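-- pv_equiv track=rewrite | github.com/kwentine/aoc2019 | day20.py | parse
-- ===== SOURCE A (Python) =====
-- from collections import defaultdict
--
-- def parse(s: str) -> dict:
--     grid = defaultdict(lambda: '')
--     x, y = 0, 0
--     for c in s:
--         if c == '\n':
--             y += 1
--             x = 0
--             continue
--         grid[x, y] = c
--         x += 1
--     return grid
-- ===== SOURCE B (Python) =====
-- from collections import defaultdict
--
-- def parse(s: str) -> dict:
--     grid = defaultdict(lambda: '')
--     for y, line in enumerate(s.split('\n')):
--         for x, c in enumerate(line):
--             grid[x, y] = c
--     return grid
-- ===== Notes on version B (the rewrite author's own statement) =====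
-- stated objective: simpler
-- what changed: Replaced A's flat character-stream scan with manual x/y counters reset on newline by splitting the input into lines first and nested enumerate loops (rows outer, columns inner), removing the mutable position state.
import Mathlib
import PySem

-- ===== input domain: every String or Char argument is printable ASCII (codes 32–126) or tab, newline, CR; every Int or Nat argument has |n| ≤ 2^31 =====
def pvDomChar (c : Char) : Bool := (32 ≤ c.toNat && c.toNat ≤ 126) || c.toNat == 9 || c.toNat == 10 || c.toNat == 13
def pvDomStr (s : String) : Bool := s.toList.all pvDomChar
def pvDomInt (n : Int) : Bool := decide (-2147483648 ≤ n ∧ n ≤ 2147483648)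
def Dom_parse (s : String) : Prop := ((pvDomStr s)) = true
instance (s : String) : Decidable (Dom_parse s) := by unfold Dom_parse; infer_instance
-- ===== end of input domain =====

-- B splits the input into lines first and uses nested row/column loops instead of A's
-- single character-stream pass with manual x/y counter state; simpler, same cost.

-- ===== PORT A =====
-- one loop step of A: on '\n' reset x and bump y, else store the char and bump x
def stepA (st : Int × Int × PySem.Dict (Int × Int) String) (c : Char) :
    Int × Int × PySem.Dict (Int × Int) String :=
  if c = '\n' then (0, st.2.1 + 1, st.2.2)
  else (st.1 + 1, st.2.1, st.2.2.insert (st.1, st.2.1) (String.ofList [c]))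

def parse (s : String) : List (Int × Int × String) :=
  let st := s.toList.foldl stepA (0, 0, PySem.Dict.empty)
  st.2.2.items.map (fun p => (p.1.1, p.1.2, p.2))

-- ===== PORT B =====
-- inner loop of B: for x, c in enumerate(line): grid[x, y] = c
def stepBInner (y : Nat) (g : PySem.Dict (Int × Int) String) (cx : Char × Nat) :
    PySem.Dict (Int × Int) String :=
  g.insert ((cx.2 : Int), (y : Int)) (String.ofList [cx.1])

-- outer loop of B: for y, line in enumerate(s.split('\n'))
def stepBRow (g : PySem.Dict (Int × Int) String) (py : List Char × Nat) :
    PySem.Dict (Int × Int) String :=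
  py.1.zipIdx.foldl (stepBInner py.2) g

def parse_alt (s : String) : List (Int × Int × String) :=
  let lines := PySem.Chars.splitOn s.toList ['\n']
  let grid := lines.zipIdx.foldl stepBRow (PySem.Dict.empty : PySem.Dict (Int × Int) String)
  grid.items.map (fun p => (p.1.1, p.1.2, p.2))

-- ===== PRECONDITION & SPEC =====
def Spec_parse (s : String) (out : List (Int × Int × String)) : Prop := out = parse_alt s
instance (s : String) (out : List (Int × Int × String)) : Decidable (Spec_parse s out) := by unfold Spec_parse; infer_instance

-- ===== CLAIM (what is proved, stated in full; the proofs are below) =====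
def Claim_equal_parse : Prop := ∀ (s : String), Dom_parse s → Spec_parse s (parse s)

-- ===== LEMMAS AND PROOFS =====

-- split a char list at '\n': (first line, remaining lines)
def spl : List Char → List Char × List (List Char)
  | [] => ([], [])
  | c :: r =>
    let (p, ps) := spl r
    if c = '\n' then ([], p :: ps) else (c :: p, ps)

-- the (key, value) pairs A appends while scanning cs from position (x, y)
def trip : List Char → Int → Int → List ((Int × Int) × String)
  | [], _, _ => []
  | c :: r, x, y =>
    if c = '\n' then trip r 0 (y + 1)
    else ((x, y), String.ofList [c]) :: trip r (x + 1) y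

-- the pairs one row contributes starting at column x
def rowTrip : List Char → Int → Int → List ((Int × Int) × String)
  | [], _, _ => []
  | c :: p, x, y => ((x, y), String.ofList [c]) :: rowTrip p (x + 1) y

-- the pairs a list of rows contributes starting at row y
def body : List (List Char) → Int → List ((Int × Int) × String)
  | [], _ => []
  | p :: ps, y => rowTrip p 0 y ++ body ps (y + 1)

lemma go_spec : ∀ (l : List Char) (fuel : Nat) (cur : List Char) (acc : List (List Char)),
    l.length ≤ fuel →
    PySem.Chars.splitOn.go ['\n'] fuel l cur acc
      = acc.reverse ++ (cur.reverse ++ (spl l).1) :: (spl l).2 := by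
  intro l
  induction l with
  | nil =>
    intro fuel cur acc _
    cases fuel <;> simp [PySem.Chars.splitOn.go, spl]
  | cons c r ih =>
    intro fuel cur acc hle
    cases fuel with
    | zero => simp at hle
    | succ f =>
      by_cases hc : c = '\n'
      · subst hc
        have : List.isPrefixOf ['\n'] ('\n' :: r) = true := by
          simp [List.isPrefixOf]
        rw [show PySem.Chars.splitOn.go ['\n'] (f + 1) ('\n' :: r) cur acc
            = PySem.Chars.splitOn.go ['\n'] f r [] (cur.reverse :: acc) by
          simp [PySem.Chars.splitOn.go, this]]
        rw [ih f [] (cur.reverse :: acc) (by simpa using Nat.le_of_succ_le_succ hle)]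
        simp [spl]
      · have hpre : List.isPrefixOf ['\n'] (c :: r) = false := by
          simp only [List.isPrefixOf, Bool.and_eq_false_iff]
          left
          simp only [beq_eq_false_iff_ne, ne_eq]
          exact fun h => hc h.symm
        rw [show PySem.Chars.splitOn.go ['\n'] (f + 1) (c :: r) cur acc
            = PySem.Chars.splitOn.go ['\n'] f r (c :: cur) acc by
          simp [PySem.Chars.splitOn.go, hpre]]
        rw [ih f (c :: cur) acc (by simp only [List.length_cons] at hle; omega)]
        simp [spl, hc]

lemma splitOn_eq_spl (l : List Char) :
    PySem.Chars.splitOn l ['\n'] = (spl l).1 :: (spl l).2 := by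
  have := go_spec l (l.length + 1) [] [] (by omega)
  simpa [PySem.Chars.splitOn] using this

-- A's scan equals trip, given every key already present is lexicographically before (x, y)
lemma foldA_items : ∀ (cs : List Char) (x y : Int) (d : PySem.Dict (Int × Int) String),
    (∀ p ∈ d.items, p.1.2 < y ∨ (p.1.2 = y ∧ p.1.1 < x)) →
    ((cs.foldl stepA (x, y, d)).2.2).items = d.items ++ trip cs x y := by
  intro cs
  induction cs with
  | nil => intro x y d _; simp [trip]
  | cons c r ih =>
    intro x y d hinv
    by_cases hc : c = '\n'
    · subst hc
      rw [List.foldl_cons, show stepA (x, y, d) '\n' = (0, y + 1, d) by simp [stepA]]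
      rw [ih 0 (y + 1) d (by intro p hp; rcases hinv p hp with h | h <;> omega)]
      simp [trip]
    · have hnc : d.contains (x, y) = false := by
        rw [PySem.Dict.contains_eq_decide_mem_keys]
        simp only [decide_eq_false_iff_not]
        intro hmem
        simp only [PySem.Dict.keys, List.mem_map] at hmem
        obtain ⟨p, hp, hpk⟩ := hmem
        rcases hinv p hp with h | h <;> rw [hpk] at h <;> omega
      rw [List.foldl_cons, show stepA (x, y, d) c
          = (x + 1, y, d.insert (x, y) (String.ofList [c])) by simp [stepA, hc]]
      rw [ih (x + 1) y (d.insert (x, y) (String.ofList [c])) (by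
        intro p hp
        rcases (PySem.Dict.mem_items_insert _ _ _ _).1 hp with h | ⟨hpd, _⟩
        · subst h; right; exact ⟨rfl, by show x < x + 1; omega⟩
        · rcases hinv p hpd with h | h
          · left; exact h
          · right; exact ⟨h.1, by omega⟩)]
      rw [PySem.Dict.items_insert_of_not_contains _ _ hnc]
      simp [trip, hc]

-- B's inner loop over one line appends rowTrip, under the same freshness invariant
lemma foldB_inner_items : ∀ (line : List Char) (m : Nat) (y : Nat)
    (d : PySem.Dict (Int × Int) String),
    (∀ p ∈ d.items, p.1.2 < (y : Int) ∨ (p.1.2 = (y : Int) ∧ p.1.1 < (m : Int))) →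
    ((line.zipIdx m).foldl (stepBInner y) d).items = d.items ++ rowTrip line (m : Int) (y : Int) := by
  intro line
  induction line with
  | nil => intro m y d _; simp [rowTrip]
  | cons c p ih =>
    intro m y d hinv
    have hnc : d.contains ((m : Int), (y : Int)) = false := by
      rw [PySem.Dict.contains_eq_decide_mem_keys]
      simp only [decide_eq_false_iff_not]
      intro hmem
      simp only [PySem.Dict.keys, List.mem_map] at hmem
      obtain ⟨q, hq, hqk⟩ := hmem
      rcases hinv q hq with h | h <;> rw [hqk] at h <;> omega
    rw [List.zipIdx_cons, List.foldl_cons,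
        show stepBInner y d (c, m) = d.insert ((m : Int), (y : Int)) (String.ofList [c]) from rfl]
    rw [ih (m + 1) y _ (by
      intro q hq
      rcases (PySem.Dict.mem_items_insert _ _ _ _).1 hq with h | ⟨hqd, _⟩
      · subst h; right; exact ⟨rfl, by show (m : Int) < ((m + 1 : Nat) : Int); push_cast; omega⟩
      · rcases hinv q hqd with h | h
        · left; exact h
        · right; exact ⟨h.1, by push_cast; omega⟩)]
    rw [PySem.Dict.items_insert_of_not_contains _ _ hnc]
    simp [rowTrip]

-- B's outer loop over the rows appends body
lemma foldB_items : ∀ (lines : List (List Char)) (n : Nat)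
    (d : PySem.Dict (Int × Int) String),
    (∀ p ∈ d.items, p.1.2 < (n : Int)) →
    ((lines.zipIdx n).foldl stepBRow d).items = d.items ++ body lines (n : Int) := by
  intro lines
  induction lines with
  | nil => intro n d _; simp [body]
  | cons p ps ih =>
    intro n d hinv
    rw [List.zipIdx_cons, List.foldl_cons]
    have hrow : (stepBRow d (p, n)).items = d.items ++ rowTrip p 0 (n : Int) := by
      unfold stepBRow
      exact foldB_inner_items p 0 n d (by intro q hq; left; exact hinv q hq)
    rw [ih (n + 1) (stepBRow d (p, n)) (by
      intro q hq
      rw [hrow] at hq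
      rcases List.mem_append.1 hq with h | h
      · have := hinv q h; push_cast; omega
      · -- keys produced by rowTrip at row n have second component n
        have hsnd : ∀ (l : List Char) (x : Int), ∀ q ∈ rowTrip l x (n : Int), q.1.2 = (n : Int) := by
          intro l
          induction l with
          | nil => intro x q hq; simp [rowTrip] at hq
          | cons c r ihr =>
            intro x q hq
            simp only [rowTrip, List.mem_cons] at hq
            rcases hq with h | h
            · subst h; rfl
            · exact ihr (x + 1) q h
        have := hsnd p 0 q h
        push_cast; omega)]
    rw [hrow, body]
    push_cast
    simp [List.append_assoc]

-- trip equals body over the split rows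
lemma trip_eq_body : ∀ (cs : List Char) (n : Nat) (y : Int),
    trip cs (n : Int) y = rowTrip (spl cs).1 (n : Int) y ++ body (spl cs).2 (y + 1) := by
  intro cs
  induction cs with
  | nil => intro n y; simp [trip, spl, rowTrip, body]
  | cons c r ih =>
    intro n y
    by_cases hc : c = '\n'
    · subst hc
      have h0 := ih 0 (y + 1)
      simp only [Nat.cast_zero] at h0
      simp only [trip, spl]
      rw [h0]
      simp [rowTrip, body]
    · have h1 := ih (n + 1) y
      push_cast at h1
      simp only [trip, spl, if_neg hc]
      rw [h1]
      cases hsp : spl r with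
      | mk p ps => simp [rowTrip]

-- ===== VERDICT (by name: the statement is the Claim_ definition above) =====
theorem parse_spec : Claim_equal_parse := by
  intro s _
  unfold Spec_parse parse parse_alt
  have hA := foldA_items s.toList 0 0 PySem.Dict.empty (by simp [PySem.Dict.empty])
  have hB := foldB_items (PySem.Chars.splitOn s.toList ['\n']) 0 PySem.Dict.empty
    (by simp [PySem.Dict.empty])
  have hT := trip_eq_body s.toList 0 0
  simp only [Nat.cast_zero] at hB hT
  dsimp only
  rw [hA, hB, hT, splitOn_eq_spl, body]
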